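-- pv_equiv track=rewrite | github.com/MetOffice/CSET | cset-workflow/app/create_model_color_map/file/create_model_color_style_file.py | create_model_color_map
-- ===== SOURCE A (Python) =====
-- DISCRETE_COLORS = [
--     "#1f77b4",
--     "#ff7f0e",
--     "#2ca02c",
--     "#d62728",
--     "#9467bd",
--     "#8c564b",
--     "#e377c2",
--     "#7f7f7f",
--     "#bcbd22",
--     "#17becf",
--     "#aec7e8",
--     "#ffbb78",
--     "#98df8a",
--     "#ff9896",
--     "#c5b0d5",
--     "#c49c94",
--     "#f7b6d2",
--     "#c7c7c7",
--     "#dbdb8d",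
--     "#9edae5",
-- ]
--
-- def create_model_color_map(model_names: list[str]) -> dict:
--     """
--     Create dict with model:color mapping.
--
--     Arguments
--     ---------
--     model_names: list
--         List of names of the models to be mapped to color
--
--     Returns
--     -------
--     model_color_map: dict
--         Dictionary with model:color mapping.
--
--     """
--     color_list = DISCRETE_COLORS
--     while len(model_names) > len(color_list):
--         color_list += color_list
--
--     return {
--         mname: color
--         for mname, color in zip(sorted(model_names), color_list, strict=False)
--     }
-- ===== SOURCE B (Python) =====
-- DISCRETE_COLORS = [
--     "#1f77b4",
--     "#ff7f0e",
--     "#2ca02c",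
--     "#d62728",
--     "#9467bd",
--     "#8c564b",
--     "#e377c2",
--     "#7f7f7f",
--     "#bcbd22",
--     "#17becf",
--     "#aec7e8",
--     "#ffbb78",
--     "#98df8a",
--     "#ff9896",
--     "#c5b0d5",
--     "#c49c94",
--     "#f7b6d2",
--     "#c7c7c7",
--     "#dbdb8d",
--     "#9edae5",
-- ]
--
--
-- def create_model_color_map(model_names: list[str]) -> dict:
--     """Create dict with model:color mapping (colors cycle through the palette)."""
--     n = len(DISCRETE_COLORS)
--     return {
--         name: DISCRETE_COLORS[i % n]
--         for i, name in enumerate(sorted(model_names))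
--     }
-- ===== Notes on version B (the rewrite author's own statement) =====
-- stated objective: simpler
-- what changed: Replaces the while-loop that repeatedly doubles (and globally mutates) the color list plus a zip with a single dict comprehension over enumerate(sorted(model_names)) that picks DISCRETE_COLORS[i % len(DISCRETE_COLORS)]; return value only — A mutates the global DISCRETE_COLORS in place via '+=', B does not.
import Mathlib
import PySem

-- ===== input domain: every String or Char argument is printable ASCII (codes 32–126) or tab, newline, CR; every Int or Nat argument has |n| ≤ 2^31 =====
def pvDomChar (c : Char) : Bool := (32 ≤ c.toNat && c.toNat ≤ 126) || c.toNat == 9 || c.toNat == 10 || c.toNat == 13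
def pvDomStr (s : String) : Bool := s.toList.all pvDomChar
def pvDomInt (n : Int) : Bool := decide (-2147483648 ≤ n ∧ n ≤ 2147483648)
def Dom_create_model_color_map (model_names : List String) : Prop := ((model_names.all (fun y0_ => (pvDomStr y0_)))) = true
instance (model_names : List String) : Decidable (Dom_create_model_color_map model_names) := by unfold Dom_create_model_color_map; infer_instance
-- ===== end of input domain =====

-- B replaces A's doubling while-loop + zip by indexing the palette at i % 20 over the enumerated sorted list (simpler; return value only: A also mutates the global color list, B does not).

def DISCRETE_COLORS : List String :=
  ["#1f77b4", "#ff7f0e", "#2ca02c", "#d62728", "#9467bd",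
   "#8c564b", "#e377c2", "#7f7f7f", "#bcbd22", "#17becf",
   "#aec7e8", "#ffbb78", "#98df8a", "#ff9896", "#c5b0d5",
   "#c49c94", "#f7b6d2", "#c7c7c7", "#dbdb8d", "#9edae5"]

-- ===== PORT A =====
-- 'while len(model_names) > len(color_list): color_list += color_list'
-- (the 0 < cl.length guard only makes the recursion total; it always holds on A's call)
def growColors (n : Nat) (cl : List String) : List String :=
  if _h : 0 < cl.length ∧ cl.length < n then growColors n (cl ++ cl) else cl
termination_by n - cl.length
decreasing_by simp only [List.length_append]; omega

def create_model_color_map (model_names : List String) : List (String × String) :=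
  let color_list := growColors model_names.length DISCRETE_COLORS
  (PySem.Dict.ofList ((PySem.List.sorted model_names (fun x => x) false).zip color_list)).items

-- ===== PORT B =====
def create_model_color_map_alt (model_names : List String) : List (String × String) :=
  let n : Int := (DISCRETE_COLORS.length : Int)
  (PySem.Dict.ofList
    ((PySem.List.enumerate (PySem.List.sorted model_names (fun x => x) false)).map
      (fun p => (p.2, PySem.List.pyGetD DISCRETE_COLORS (PySem.Int.mod p.1 n) "")))).items

-- ===== PRECONDITION & SPEC =====
def Spec_create_model_color_map (model_names : List String) (out : List (String × String)) : Prop := out = create_model_color_map_alt model_names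
instance (model_names : List String) (out : List (String × String)) : Decidable (Spec_create_model_color_map model_names out) := by unfold Spec_create_model_color_map; infer_instance

-- ===== CLAIM (what is proved, stated in full; the proofs are below) =====
def Claim_equal_create_model_color_map : Prop := ∀ (model_names : List String), Dom_create_model_color_map model_names → Spec_create_model_color_map model_names (create_model_color_map model_names)

-- ===== LEMMAS AND PROOFS =====

theorem flatten_rep_double (m : Nat) (cl : List String) :
    (List.replicate m (cl ++ cl)).flatten = (List.replicate (2 * m) cl).flatten := by
  induction m with
  | zero => simp
  | succ k ih =>
      have h2 : 2 * (k + 1) = (2 * k) + 1 + 1 := by omega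
      simp [List.replicate_succ, h2, ih, List.append_assoc]

theorem grow_rep (n : Nat) (cl : List String) (h0 : 0 < cl.length) :
    ∃ m : Nat, 0 < m ∧ growColors n cl = (List.replicate m cl).flatten ∧
      n ≤ m * cl.length := by
  by_cases h : cl.length < n
  · rw [growColors, dif_pos ⟨h0, h⟩]
    obtain ⟨m, hm0, heq, hle⟩ := grow_rep n (cl ++ cl) (by simp; omega)
    refine ⟨2 * m, by omega, ?_, ?_⟩
    · rw [heq, flatten_rep_double]
    · have hr : 2 * m * cl.length = m * (cl ++ cl).length := by
        simp [List.length_append]; ring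
      omega
  · rw [growColors, dif_neg (by omega)]
    exact ⟨1, by omega, by simp, by omega⟩
termination_by n - cl.length
decreasing_by simp only [List.length_append]; omega

theorem flatten_rep_getD (m : Nat) (cl : List String) (i : Nat) (hi : i < m * cl.length) :
    ((List.replicate m cl).flatten).getD i "" = cl.getD (i % cl.length) "" := by
  induction m generalizing i with
  | zero => simp at hi
  | succ k ih =>
      have h0 : 0 < cl.length := by
        rcases Nat.eq_zero_or_pos cl.length with h | h
        · rw [h] at hi; simp at hi
        · exact h
      have hsm : (k + 1) * cl.length = k * cl.length + cl.length := Nat.succ_mul k _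
      rw [List.replicate_succ, List.flatten_cons]
      by_cases h : i < cl.length
      · rw [List.getD_append cl _ "" i h, Nat.mod_eq_of_lt h]
      · rw [List.getD_append_right cl _ "" i (by omega)]
        have hmod : (i - cl.length) % cl.length = i % cl.length := by
          conv_rhs => rw [show i = (i - cl.length) + cl.length by omega]
          rw [Nat.add_mod_right]
        rw [ih (i - cl.length) (by omega), hmod]

-- ===== VERDICT (by name: the statement is the Claim_ definition above) =====
theorem create_model_color_map_spec : Claim_equal_create_model_color_map := by
  intro model_names _
  unfold Spec_create_model_color_map create_model_color_map create_model_color_map_alt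
  have hlen20 : DISCRETE_COLORS.length = 20 := by decide
  set s := PySem.List.sorted model_names (fun x => x) false with hs
  have hslen : s.length = model_names.length := PySem.List.length_sorted ..
  obtain ⟨m, hm0, heq, hle⟩ := grow_rep model_names.length DISCRETE_COLORS (by decide)
  rw [hlen20] at hle
  have hglen : (growColors model_names.length DISCRETE_COLORS).length = m * 20 := by
    rw [heq]; simp [List.length_flatten, hlen20]
  have hkey : s.zip (growColors model_names.length DISCRETE_COLORS) =
      (PySem.List.enumerate s).map
        (fun p => (p.2, PySem.List.pyGetD DISCRETE_COLORS (PySem.Int.mod p.1 (DISCRETE_COLORS.length : Int)) "")) := by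
    apply List.ext_getElem
    · rw [List.length_zip, List.length_map, PySem.List.length_enumerate, hglen, hslen]
      omega
    · intro i h1 h2
      rw [List.length_map, PySem.List.length_enumerate] at h2
      have hig : i < m * 20 := by omega
      rw [List.getElem_zip, List.getElem_map, PySem.List.getElem_enumerate]
      have hmod : PySem.Int.mod (i : Int) (DISCRETE_COLORS.length : Int) = ((i % 20 : Nat) : Int) := by
        rw [hlen20]; simp [PySem.Int.mod, Int.fmod_eq_emod]
      have hgi : (growColors model_names.length DISCRETE_COLORS)[i]'(by omega) =
          DISCRETE_COLORS.getD (i % 20) "" := by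
        rw [← List.getD_eq_getElem _ "" (by omega), heq,
          flatten_rep_getD m DISCRETE_COLORS i (by rw [hlen20]; omega), hlen20]
      have hfin : PySem.List.pyGetD DISCRETE_COLORS ((i : Int) % (DISCRETE_COLORS.length : Int)) "" =
          DISCRETE_COLORS.getD (i % 20) "" := by
        rw [hlen20]
        push_cast
        have hcast : ((i : Int) % (20 : Int)) = ((i % 20 : Nat) : Int) := by omega
        rw [hcast, PySem.List.pyGetD_natCast]
      simp [hgi, PySem.Int.mod, Int.fmod_eq_emod, hfin]
  dsimp only
  rw [hkey]
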